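-- pv_equiv track=rewrite | github.com/cce2955/TvCGUI-Main | tdp-modules/tvc_experiments/scan_normals_all.py | cluster_tails
-- ===== SOURCE A (Python) =====
-- CLUSTER_GAP = 0x4000
--
-- def cluster_tails(tail_offs):
--     if not tail_offs:
--         return []
--     clusters = []
--     cur = [tail_offs[0]]
--     for o in tail_offs[1:]:
--         if o - cur[-1] <= CLUSTER_GAP:
--             cur.append(o)
--         else:
--             clusters.append(cur)
--             cur = [o]
--     clusters.append(cur)
--     return clusters
-- ===== SOURCE B (Python) =====
-- CLUSTER_GAP = 0x4000
--
-- def cluster_tails(tail_offs):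
--     if not tail_offs:
--         return []
--     n = len(tail_offs)
--     bounds = [0]
--     for i in range(1, n):
--         if tail_offs[i] - tail_offs[i - 1] > CLUSTER_GAP:
--             bounds.append(i)
--     bounds.append(n)
--     return [tail_offs[b:e] for b, e in zip(bounds, bounds[1:])]
-- ===== Notes on version B (the rewrite author's own statement) =====
-- stated objective: alternative
-- what changed: B makes one pass collecting cluster boundary indices and then builds every cluster by slicing between consecutive boundaries, instead of A's accumulator that grows the current cluster element by element.
import Mathlib
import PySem

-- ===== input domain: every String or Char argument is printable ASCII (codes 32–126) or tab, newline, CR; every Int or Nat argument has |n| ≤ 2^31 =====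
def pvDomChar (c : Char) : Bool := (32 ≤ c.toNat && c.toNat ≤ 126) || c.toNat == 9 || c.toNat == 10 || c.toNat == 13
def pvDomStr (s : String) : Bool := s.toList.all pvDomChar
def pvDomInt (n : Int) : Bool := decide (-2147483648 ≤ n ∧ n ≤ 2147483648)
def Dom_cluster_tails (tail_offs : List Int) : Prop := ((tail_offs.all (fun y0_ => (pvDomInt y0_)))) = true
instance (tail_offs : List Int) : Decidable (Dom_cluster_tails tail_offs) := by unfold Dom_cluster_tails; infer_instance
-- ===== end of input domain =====

-- B finds cluster boundary indices in one pass and materialises each cluster by slicing;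
-- A instead grows the current cluster element by element (alternative decomposition, same cost).

-- ===== PORT A =====
-- step of A's loop: state = (clusters, cur); cur is never empty, cur[-1] via pyGetD
def stepA (st : List (List Int) × List Int) (o : Int) : List (List Int) × List Int :=
  if o - PySem.List.pyGetD st.2 (-1) 0 ≤ 16384 then (st.1, st.2 ++ [o])
  else (st.1 ++ [st.2], [o])

def cluster_tails (tail_offs : List Int) : List (List Int) :=
  match tail_offs with
  | [] => []
  | x :: _ =>
    let st := (PySem.List.slice tail_offs (some 1) none).foldl stepA ([], [x])
    st.1 ++ [st.2]

-- ===== PORT B =====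
-- step of B's boundary loop: append index i to bounds when the gap before i exceeds CLUSTER_GAP
def stepB (xs : List Int) (acc : List Int) (i : Int) : List Int :=
  if PySem.List.pyGetD xs i 0 - PySem.List.pyGetD xs (i - 1) 0 > 16384 then acc ++ [i] else acc

def cluster_tails_alt (tail_offs : List Int) : List (List Int) :=
  if tail_offs = [] then []
  else
    let n : Int := tail_offs.length
    let bounds := (PySem.List.pyRange 1 n 1).foldl (stepB tail_offs) [(0 : Int)]
    let bounds := bounds ++ [n]
    (bounds.zip (bounds.drop 1)).map (fun be => PySem.List.slice tail_offs (some be.1) (some be.2))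

-- ===== PRECONDITION & SPEC =====
def Spec_cluster_tails (tail_offs : List Int) (out : List (List Int)) : Prop := out = cluster_tails_alt tail_offs
instance (tail_offs : List Int) (out : List (List Int)) : Decidable (Spec_cluster_tails tail_offs out) := by unfold Spec_cluster_tails; infer_instance

-- ===== CLAIM (what is proved, stated in full; the proofs are below) =====
def Claim_equal_cluster_tails : Prop := ∀ (tail_offs : List Int), Dom_cluster_tails tail_offs → Spec_cluster_tails tail_offs (cluster_tails tail_offs)

-- ===== LEMMAS AND PROOFS =====

-- cut indices from i upward (B's boundary loop restarted at i with empty accumulator)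
def cutsN (xs : List Int) (i : Int) : List Int :=
  (PySem.List.pyRange i (xs.length : Int) 1).foldl (stepB xs) []

-- clusters from a boundary list: one slice per consecutive pair
def slicesFrom (xs : List Int) (a : Int) (bs : List Int) : List (List Int) :=
  match bs with
  | [] => []
  | b :: t => PySem.List.slice xs (some a) (some b) :: slicesFrom xs b t

theorem foldB_init (xs : List Int) (l : List Int) (init : List Int) :
    l.foldl (stepB xs) init = init ++ l.foldl (stepB xs) [] := by
  induction l generalizing init with
  | nil => simp
  | cons j t ih =>
    simp only [List.foldl_cons]
    rw [ih, ih (stepB xs [] j)]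
    unfold stepB
    split_ifs <;> simp

theorem zip_map_slices (xs : List Int) (a : Int) (bs : List Int) :
    (((a :: bs).zip ((a :: bs).drop 1)).map
        (fun be => PySem.List.slice xs (some be.1) (some be.2))) = slicesFrom xs a bs := by
  induction bs generalizing a with
  | nil => simp [slicesFrom]
  | cons b t ih => simp [slicesFrom, ← ih b]

theorem take_drop_getLast (xs : List Int) (s i : Nat) (hsi : s < i) (hin : i ≤ xs.length) :
    PySem.List.pyGetD ((xs.drop s).take (i - s)) (-1) 0 = xs[i - 1]'(by omega) := by
  have hne : (xs.drop s).take (i - s) ≠ [] := by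
    simp
    omega
  rw [PySem.List.pyGetD_neg_one _ 0 hne]
  rw [List.getLast_eq_getElem]
  have hlen : ((xs.drop s).take (i - s)).length = i - s := by
    simp [List.length_take, List.length_drop]; omega
  simp only [hlen]
  rw [List.getElem_take, List.getElem_drop]
  congr 1
  omega

theorem take_succ_append (xs : List Int) (s i : Nat) (hsi : s ≤ i) (hin : i < xs.length) :
    (xs.drop s).take (i - s) ++ [xs[i]] = (xs.drop s).take (i + 1 - s) := by
  have h1 : i + 1 - s = (i - s) + 1 := by omega
  have h2 : i - s < (xs.drop s).length := by simp; omega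
  rw [h1, List.take_add_one, List.getElem?_eq_getElem h2, List.getElem_drop]
  have h3 : s + (i - s) = i := by omega
  simp [h3]

theorem main_lemma (xs : List Int) (k : Nat) :
    ∀ (i s : Nat) (cl : List (List Int)),
      i + k = xs.length → s < i →
      (let st := (xs.drop i).foldl stepA (cl, (xs.drop s).take (i - s))
       st.1 ++ [st.2])
      = cl ++ slicesFrom xs (s : Int) (cutsN xs (i : Int) ++ [(xs.length : Int)]) := by
  induction k with
  | zero =>
    intro i s cl hik hsi
    have hin : i = xs.length := by omega
    subst hin
    simp only [List.drop_length, List.foldl_nil]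
    rw [cutsN, PySem.List.pyRange_one_eq_nil (by omega)]
    simp [slicesFrom, PySem.List.slice_natCast]
  | succ k ih =>
    intro i s cl hik hsi
    have hin : i < xs.length := by omega
    have hdrop : xs.drop i = xs[i] :: xs.drop (i + 1) := by
      rw [List.drop_eq_getElem_cons hin]
    rw [hdrop]
    simp only [List.foldl_cons]
    -- the element compared by A is xs[i-1]
    have hlast : PySem.List.pyGetD ((xs.drop s).take (i - s)) (-1) 0 = xs[i - 1]'(by omega) :=
      take_drop_getLast xs s i hsi (by omega)
    -- B's condition at index i talks about the same two elements
    have hBi : PySem.List.pyGetD xs (i : Int) 0 = xs[i] := by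
      rw [PySem.List.pyGetD_natCast]; exact List.getD_eq_getElem xs 0 hin
    have hBi1 : PySem.List.pyGetD xs ((i : Int) - 1) 0 = xs[i - 1]'(by omega) := by
      have h1 : (i : Int) - 1 = ((i - 1 : Nat) : Int) := by omega
      rw [h1, PySem.List.pyGetD_natCast]
      exact List.getD_eq_getElem xs 0 (by omega)
    -- expand B's cut list at index i
    have hcuts : cutsN xs (i : Int)
        = stepB xs [] (i : Int) ++ cutsN xs ((i + 1 : Nat) : Int) := by
      rw [cutsN, PySem.List.pyRange_one_cons (by omega)]
      simp only [List.foldl_cons]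
      rw [foldB_init]
      congr 1
    rw [stepA, hlast, hcuts]
    unfold stepB
    rw [hBi, hBi1]
    by_cases hgap : xs[i] - xs[i - 1]'(by omega) ≤ 16384
    · -- no cut at i: cur grows, boundary list unchanged
      rw [if_pos hgap, if_neg (by omega)]
      simp only [List.nil_append]
      rw [take_succ_append xs s i (by omega) hin]
      exact ih (i + 1) s cl (by omega) (by omega)
    · -- cut at i: A closes cur, B records boundary i
      rw [if_neg hgap, if_pos (by omega)]
      have htake1 : (xs.drop i).take ((i + 1) - i) = [xs[i]] := by
        rw [hdrop, Nat.add_sub_cancel_left]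
        rfl
      have ihc := ih (i + 1) i (cl ++ [(xs.drop s).take (i - s)]) (by omega) (by omega)
      rw [htake1] at ihc
      simp only [List.cons_append, List.nil_append]
      rw [slicesFrom, PySem.List.slice_natCast, ihc]
      simp

-- ===== VERDICT (by name: the statement is the Claim_ definition above) =====
theorem cluster_tails_spec : Claim_equal_cluster_tails := by
  intro xs _
  unfold Spec_cluster_tails
  cases xs with
  | nil => rfl
  | cons x rest =>
    unfold cluster_tails cluster_tails_alt
    simp only [if_neg (List.cons_ne_nil x rest)]
    rw [PySem.List.slice_from_one]
    have hmain := main_lemma (x :: rest) ((x :: rest).length - 1) 1 0 []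
      (by simp only [List.length_cons]; omega) (by omega)
    simp only [List.drop_one, List.drop_zero, Nat.cast_zero, Nat.cast_one] at hmain
    rw [show List.take (1 - 0) (x :: rest) = [x] from rfl] at hmain
    rw [hmain, foldB_init]
    rw [show List.foldl (stepB (x :: rest)) [] (PySem.List.pyRange 1 ((x :: rest).length : Int) 1)
          = cutsN (x :: rest) 1 from rfl]
    simp only [List.nil_append, List.cons_append]
    rw [zip_map_slices (x :: rest) 0 (cutsN (x :: rest) 1 ++ [((x :: rest).length : Int)])]
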